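-- pv_equiv track=rewrite | github.com/pedroanisio/ai-shared-hig | improve_content_quality.py | _generate_manifestations_for_pattern
-- ===== SOURCE A (Python) =====
-- from typing import Dict, List, Tuple
--
-- def _generate_manifestations_for_pattern(pattern_name: str,
--                                         count: int) -> List[Tuple[str, str]]:
--     """Generate realistic manifestation examples"""
--     # Common AI tools and platforms
--     examples = []
--
--     if 'mode' in pattern_name.lower() or 'switch' in pattern_name.lower():
--         examples = [
--             ("GitHub Copilot Mode Toggle", "Switch between ghost text, panel, and disabled modes"),
--             ("Cursor AI Composer Modes", "Toggle between normal, agent, and chat modes"),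
--             ("ChatGPT Model Switcher", "Switch between GPT-3.5, GPT-4, and GPT-4o models"),
--         ]
--     elif 'confidence' in pattern_name.lower():
--         examples = [
--             ("Grammarly Confidence Score", "Shows confidence level for grammar suggestions"),
--             ("GitHub Copilot Certainty", "Displays how confident the AI is in its suggestion"),
--             ("Perplexity AI Source Quality", "Indicates confidence in cited source information"),
--         ]
--     elif 'stream' in pattern_name.lower():
--         examples = [
--             ("ChatGPT Response Streaming", "Token-by-token streaming of AI responses"),
--             ("Claude Message Streaming", "Progressive display of generated content"),
--             ("Perplexity Search Streaming", "Real-time streaming of search results"),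
--         ]
--     elif 'ui' in pattern_name.lower() or 'generative' in pattern_name.lower():
--         examples = [
--             ("Claude Artifacts", "AI-generated interactive UI components"),
--             ("v0.dev by Vercel", "Natural language to UI generation"),
--             ("ChatGPT Canvas", "Dynamic UI for collaborative editing"),
--         ]
--     elif 'agent' in pattern_name.lower():
--         examples = [
--             ("AutoGPT Agent System", "Multi-agent autonomous task execution"),
--             ("LangChain Agent Workflows", "Orchestrated agent task chains"),
--             ("CrewAI Team Coordination", "Multiple specialized AI agents collaborating"),
--         ]
--     elif 'visual' in pattern_name.lower() or 'display' in pattern_name.lower():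
--         examples = [
--             ("VS Code Inline Suggestions", "Visual display of AI suggestions"),
--             ("Notion AI Inline Commands", "Contextual AI action visualization"),
--             ("Figma AI Design Assist", "Visual AI design suggestions"),
--         ]
--     else:
--         # Generic AI tool examples
--         examples = [
--             ("ChatGPT Implementation", f"{pattern_name} in ChatGPT interface"),
--             ("Claude Implementation", f"{pattern_name} in Claude interface"),
--             ("GitHub Copilot Implementation", f"{pattern_name} in VS Code"),
--         ]
--
--     # Pad if needed
--     while len(examples) < count:
--         examples.append((
--             f"AI Tool Example {len(examples) + 1}",
--             f"Implementation of {pattern_name} in modern AI application"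
--         ))
--
--     return examples[:count]
-- ===== SOURCE B (Python) =====
-- from typing import Dict, List, Tuple
--
-- # Flat keyword -> rule-index map; the selected rule is the MINIMUM index among
-- # matching keywords, which coincides with the original first-match cascade.
-- _KEYWORD_RULE = [
--     ("mode", 0), ("switch", 0),
--     ("confidence", 1),
--     ("stream", 2),
--     ("ui", 3), ("generative", 3),
--     ("agent", 4),
--     ("visual", 5), ("display", 5),
-- ]
--
-- _TABLES = [
--     [("GitHub Copilot Mode Toggle", "Switch between ghost text, panel, and disabled modes"),
--      ("Cursor AI Composer Modes", "Toggle between normal, agent, and chat modes"),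
--      ("ChatGPT Model Switcher", "Switch between GPT-3.5, GPT-4, and GPT-4o models")],
--     [("Grammarly Confidence Score", "Shows confidence level for grammar suggestions"),
--      ("GitHub Copilot Certainty", "Displays how confident the AI is in its suggestion"),
--      ("Perplexity AI Source Quality", "Indicates confidence in cited source information")],
--     [("ChatGPT Response Streaming", "Token-by-token streaming of AI responses"),
--      ("Claude Message Streaming", "Progressive display of generated content"),
--      ("Perplexity Search Streaming", "Real-time streaming of search results")],
--     [("Claude Artifacts", "AI-generated interactive UI components"),
--      ("v0.dev by Vercel", "Natural language to UI generation"),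
--      ("ChatGPT Canvas", "Dynamic UI for collaborative editing")],
--     [("AutoGPT Agent System", "Multi-agent autonomous task execution"),
--      ("LangChain Agent Workflows", "Orchestrated agent task chains"),
--      ("CrewAI Team Coordination", "Multiple specialized AI agents collaborating")],
--     [("VS Code Inline Suggestions", "Visual display of AI suggestions"),
--      ("Notion AI Inline Commands", "Contextual AI action visualization"),
--      ("Figma AI Design Assist", "Visual AI design suggestions")],
-- ]
--
--
-- def _generate_manifestations_for_pattern(pattern_name: str,
--                                         count: int) -> List[Tuple[str, str]]:
--     """Build the result directly by output index: no branch cascade, no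
--     padding loop, no slicing. The i-th output element is computed from i."""
--     low = pattern_name.lower()
--     idx = min((r for kw, r in _KEYWORD_RULE if kw in low), default=len(_TABLES))
--
--     def entry(i: int) -> Tuple[str, str]:
--         if i >= 3:
--             return (f"AI Tool Example {i + 1}",
--                     f"Implementation of {pattern_name} in modern AI application")
--         if idx < len(_TABLES):
--             return _TABLES[idx][i]
--         generic_tool = ("ChatGPT Implementation", "Claude Implementation",
--                         "GitHub Copilot Implementation")[i]
--         generic_where = ("ChatGPT interface", "Claude interface", "VS Code")[i]
--         return (generic_tool, f"{pattern_name} in {generic_where}")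
--
--     return [entry(i) for i in range(count)]
-- ===== Notes on version B (the rewrite author's own statement) =====
-- stated objective: alternative
-- what changed: B computes the i-th output element directly from the index i (pad entries for i>=3, otherwise a row of a table chosen by the minimum rule index over a flat keyword->index map), building the result as one map over range(count) with no branch cascade, no padding loop and no slicing.
-- intended difference: For count in {-1,-2} A returns a nonempty prefix of the three base examples (an artifact of Python negative-slice semantics applied to a requested example count), while B returns [], the intended value when a negative number of examples is requested. — e.g. on _generate_manifestations_for_pattern("x", -1): A returns [("ChatGPT Implementation", "x in ChatGPT interface"), ("Claude Implementation", "x in Claude interface")], B returns []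
import Mathlib
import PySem

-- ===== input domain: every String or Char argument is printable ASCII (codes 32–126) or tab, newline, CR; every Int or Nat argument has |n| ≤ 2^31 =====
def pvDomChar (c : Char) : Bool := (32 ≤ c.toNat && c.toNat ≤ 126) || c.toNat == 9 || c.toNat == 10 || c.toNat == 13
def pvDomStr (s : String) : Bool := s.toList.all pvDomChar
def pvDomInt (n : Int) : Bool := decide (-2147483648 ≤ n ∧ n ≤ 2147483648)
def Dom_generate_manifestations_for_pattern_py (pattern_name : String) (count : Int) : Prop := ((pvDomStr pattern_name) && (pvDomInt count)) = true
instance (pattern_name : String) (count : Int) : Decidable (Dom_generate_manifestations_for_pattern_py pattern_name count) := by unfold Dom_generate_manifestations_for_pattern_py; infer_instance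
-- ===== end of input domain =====

-- B builds each output element directly from its index (min-rule-index keyword lookup, no
-- branch cascade, no padding loop, no slicing); objective: alternative decomposition, same cost.

-- ===== PORT A =====
-- the 'while len(examples) < count: examples.append(...)' loop of A
def pvPadA (pattern_name : String) (count : Int) (examples : List (String × String)) : List (String × String) :=
  if (examples.length : Int) < count then
    pvPadA pattern_name count (examples ++
      [("AI Tool Example " ++ PySem.Int.toStr ((examples.length : Int) + 1),
        "Implementation of " ++ pattern_name ++ " in modern AI application")])
  else examples
termination_by (count - examples.length).toNat
decreasing_by simp; omega

def generate_manifestations_for_pattern_py (pattern_name : String) (count : Int) : List (String × String) :=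
  let examples : List (String × String) :=
    if PySem.Str.isIn "mode" (PySem.Str.lower pattern_name) || PySem.Str.isIn "switch" (PySem.Str.lower pattern_name) then
      [("GitHub Copilot Mode Toggle", "Switch between ghost text, panel, and disabled modes"),
       ("Cursor AI Composer Modes", "Toggle between normal, agent, and chat modes"),
       ("ChatGPT Model Switcher", "Switch between GPT-3.5, GPT-4, and GPT-4o models")]
    else if PySem.Str.isIn "confidence" (PySem.Str.lower pattern_name) then
      [("Grammarly Confidence Score", "Shows confidence level for grammar suggestions"),
       ("GitHub Copilot Certainty", "Displays how confident the AI is in its suggestion"),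
       ("Perplexity AI Source Quality", "Indicates confidence in cited source information")]
    else if PySem.Str.isIn "stream" (PySem.Str.lower pattern_name) then
      [("ChatGPT Response Streaming", "Token-by-token streaming of AI responses"),
       ("Claude Message Streaming", "Progressive display of generated content"),
       ("Perplexity Search Streaming", "Real-time streaming of search results")]
    else if PySem.Str.isIn "ui" (PySem.Str.lower pattern_name) || PySem.Str.isIn "generative" (PySem.Str.lower pattern_name) then
      [("Claude Artifacts", "AI-generated interactive UI components"),
       ("v0.dev by Vercel", "Natural language to UI generation"),
       ("ChatGPT Canvas", "Dynamic UI for collaborative editing")]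
    else if PySem.Str.isIn "agent" (PySem.Str.lower pattern_name) then
      [("AutoGPT Agent System", "Multi-agent autonomous task execution"),
       ("LangChain Agent Workflows", "Orchestrated agent task chains"),
       ("CrewAI Team Coordination", "Multiple specialized AI agents collaborating")]
    else if PySem.Str.isIn "visual" (PySem.Str.lower pattern_name) || PySem.Str.isIn "display" (PySem.Str.lower pattern_name) then
      [("VS Code Inline Suggestions", "Visual display of AI suggestions"),
       ("Notion AI Inline Commands", "Contextual AI action visualization"),
       ("Figma AI Design Assist", "Visual AI design suggestions")]
    else
      [("ChatGPT Implementation", pattern_name ++ " in ChatGPT interface"),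
       ("Claude Implementation", pattern_name ++ " in Claude interface"),
       ("GitHub Copilot Implementation", pattern_name ++ " in VS Code")]
  PySem.List.slice (pvPadA pattern_name count examples) none (some count)

-- ===== PORT B =====
def pvKeywordRule : List (String × Int) :=
  [("mode", 0), ("switch", 0), ("confidence", 1), ("stream", 2),
   ("ui", 3), ("generative", 3), ("agent", 4), ("visual", 5), ("display", 5)]

def pvTables : List (List (String × String)) :=
  [[("GitHub Copilot Mode Toggle", "Switch between ghost text, panel, and disabled modes"),
    ("Cursor AI Composer Modes", "Toggle between normal, agent, and chat modes"),
    ("ChatGPT Model Switcher", "Switch between GPT-3.5, GPT-4, and GPT-4o models")],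
   [("Grammarly Confidence Score", "Shows confidence level for grammar suggestions"),
    ("GitHub Copilot Certainty", "Displays how confident the AI is in its suggestion"),
    ("Perplexity AI Source Quality", "Indicates confidence in cited source information")],
   [("ChatGPT Response Streaming", "Token-by-token streaming of AI responses"),
    ("Claude Message Streaming", "Progressive display of generated content"),
    ("Perplexity Search Streaming", "Real-time streaming of search results")],
   [("Claude Artifacts", "AI-generated interactive UI components"),
    ("v0.dev by Vercel", "Natural language to UI generation"),
    ("ChatGPT Canvas", "Dynamic UI for collaborative editing")],
   [("AutoGPT Agent System", "Multi-agent autonomous task execution"),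
    ("LangChain Agent Workflows", "Orchestrated agent task chains"),
    ("CrewAI Team Coordination", "Multiple specialized AI agents collaborating")],
   [("VS Code Inline Suggestions", "Visual display of AI suggestions"),
    ("Notion AI Inline Commands", "Contextual AI action visualization"),
    ("Figma AI Design Assist", "Visual AI design suggestions")]]

-- B's entry(i): the i-th output element, computed directly from the index.
-- (_TABLES[idx][i] and the two index-3 tuples are always indexed in range in B; pyGetD's
-- default is a totality guard only, never reached.)
def pvEntry (pattern_name : String) (idx : Int) (i : Int) : String × String :=
  if 3 ≤ i then
    ("AI Tool Example " ++ PySem.Int.toStr (i + 1),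
     "Implementation of " ++ pattern_name ++ " in modern AI application")
  else if idx < (pvTables.length : Int) then
    PySem.List.pyGetD (PySem.List.pyGetD pvTables idx []) i ("", "")
  else
    (PySem.List.pyGetD ["ChatGPT Implementation", "Claude Implementation", "GitHub Copilot Implementation"] i "",
     pattern_name ++ " in " ++ PySem.List.pyGetD ["ChatGPT interface", "Claude interface", "VS Code"] i "")

def generate_manifestations_for_pattern_py_alt (pattern_name : String) (count : Int) : List (String × String) :=
  let low := PySem.Str.lower pattern_name
  let idx := (PySem.List.min?
      ((pvKeywordRule.filter (fun p => PySem.Str.isIn p.1 low)).map (fun p => p.2))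
      (fun x => x)).getD (pvTables.length : Int)
  (PySem.List.pyRange 0 count 1).map (pvEntry pattern_name idx)

-- ===== PRECONDITION & SPEC =====
-- For count in {-1,-2} A returns a nonempty prefix of the three base examples (an artifact of
-- Python's negative-slice semantics applied to a requested example count), while B returns [],
-- the intended value when a negative number of examples is requested.
def D_generate_manifestations_for_pattern_py (pattern_name : String) (count : Int) : Prop :=
  -2 ≤ count ∧ count ≤ -1
instance (pattern_name : String) (count : Int) : Decidable (D_generate_manifestations_for_pattern_py pattern_name count) := by unfold D_generate_manifestations_for_pattern_py; infer_instance

def Spec_generate_manifestations_for_pattern_py (pattern_name : String) (count : Int) (out : List (String × String)) : Prop := ¬ D_generate_manifestations_for_pattern_py pattern_name count → out = generate_manifestations_for_pattern_py_alt pattern_name count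
instance (pattern_name : String) (count : Int) (out : List (String × String)) : Decidable (Spec_generate_manifestations_for_pattern_py pattern_name count out) := by unfold Spec_generate_manifestations_for_pattern_py; infer_instance

def pvDiffWitness_generate_manifestations_for_pattern_py : String × Int := ("x", -1)
def pvDiffWitnessOut_generate_manifestations_for_pattern_py : (List (String × String)) × (List (String × String)) :=
  ([("ChatGPT Implementation", "x in ChatGPT interface"), ("Claude Implementation", "x in Claude interface")], [])

-- ===== CLAIM (what is proved, stated in full; the proofs are below) =====
def Claim_unchanged_generate_manifestations_for_pattern_py : Prop := ∀ (pattern_name : String) (count : Int), Dom_generate_manifestations_for_pattern_py pattern_name count → Spec_generate_manifestations_for_pattern_py pattern_name count (generate_manifestations_for_pattern_py pattern_name count)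
def Claim_changed_generate_manifestations_for_pattern_py : Prop := Dom_generate_manifestations_for_pattern_py (pvDiffWitness_generate_manifestations_for_pattern_py.1) (pvDiffWitness_generate_manifestations_for_pattern_py.2) ∧ D_generate_manifestations_for_pattern_py (pvDiffWitness_generate_manifestations_for_pattern_py.1) (pvDiffWitness_generate_manifestations_for_pattern_py.2) ∧ generate_manifestations_for_pattern_py (pvDiffWitness_generate_manifestations_for_pattern_py.1) (pvDiffWitness_generate_manifestations_for_pattern_py.2) = pvDiffWitnessOut_generate_manifestations_for_pattern_py.1 ∧ generate_manifestations_for_pattern_py_alt (pvDiffWitness_generate_manifestations_for_pattern_py.1) (pvDiffWitness_generate_manifestations_for_pattern_py.2) = pvDiffWitnessOut_generate_manifestations_for_pattern_py.2 ∧ pvDiffWitnessOut_generate_manifestations_for_pattern_py.1 ≠ pvDiffWitnessOut_generate_manifestations_for_pattern_py.2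
def Claim_exact_generate_manifestations_for_pattern_py : Prop := ∀ (pattern_name : String) (count : Int), Dom_generate_manifestations_for_pattern_py pattern_name count → D_generate_manifestations_for_pattern_py pattern_name count → generate_manifestations_for_pattern_py pattern_name count ≠ generate_manifestations_for_pattern_py_alt pattern_name count

-- ===== LEMMAS AND PROOFS =====

-- A's while-padding loop is the append of one tagged pair per index of range(len(examples), count)
theorem pvPadA_eq (pattern_name : String) (count : Int) (examples : List (String × String)) :
    pvPadA pattern_name count examples = examples ++
      (PySem.List.pyRange (examples.length : Int) count 1).map (fun i =>
        ("AI Tool Example " ++ PySem.Int.toStr (i + 1),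
         "Implementation of " ++ pattern_name ++ " in modern AI application")) := by
  rw [pvPadA]
  split
  · rename_i h
    rw [pvPadA_eq pattern_name count, PySem.List.pyRange_one_cons h]
    simp
  · rename_i h
    rw [PySem.List.pyRange_one_eq_nil (by omega)]
    simp
termination_by (count - examples.length).toNat
decreasing_by simp; omega

-- B's min-over-matching-keyword-indices selection, as an if-cascade over the keyword tests
theorem pvIdx_formula (g : String → Bool) :
    (PySem.List.min?
        ((pvKeywordRule.filter (fun p => g p.1)).map (fun p => p.2)) (fun x => x)).getD (pvTables.length : Int) =
      (if g "mode" || g "switch" then 0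
       else if g "confidence" then 1
       else if g "stream" then 2
       else if g "ui" || g "generative" then 3
       else if g "agent" then 4
       else if g "visual" || g "display" then 5
       else 6 : Int) := by
  simp only [pvKeywordRule, List.filter_cons, List.filter_nil]
  generalize g "mode" = b1
  generalize g "switch" = b2
  generalize g "confidence" = b3
  generalize g "stream" = b4
  generalize g "ui" = b5
  generalize g "generative" = b6
  generalize g "agent" = b7
  generalize g "visual" = b8
  generalize g "display" = b9
  revert b1 b2 b3 b4 b5 b6 b7 b8 b9
  decide

-- slicing the padded base to count elements = mapping entry over range(count)
theorem pvKey (pattern_name : String) (count : Int) (hc : 0 ≤ count)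
    (x0 x1 x2 : String × String) (e : Int → String × String)
    (h0 : e 0 = x0) (h1 : e 1 = x1) (h2 : e 2 = x2)
    (hp : ∀ i : Int, 3 ≤ i → e i =
      ("AI Tool Example " ++ PySem.Int.toStr (i + 1),
       "Implementation of " ++ pattern_name ++ " in modern AI application")) :
    PySem.List.slice ([x0, x1, x2] ++ (PySem.List.pyRange (([x0, x1, x2].length : Nat) : Int) count 1).map (fun i =>
        ("AI Tool Example " ++ PySem.Int.toStr (i + 1),
         "Implementation of " ++ pattern_name ++ " in modern AI application"))) none (some count)
      = (PySem.List.pyRange 0 count 1).map e := by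
  have hlen3 : (([x0, x1, x2].length : Nat) : Int) = 3 := by simp
  rw [hlen3, PySem.List.slice_to _ hc]
  by_cases h3 : count ≤ 3
  · rw [PySem.List.pyRange_one_eq_nil h3]
    interval_cases count <;>
      simp [PySem.List.pyRange_one, List.range_succ, h0, h1, h2]
  · push_neg at h3
    rw [List.take_of_length_le (by
        simp [PySem.List.length_pyRange_one]; omega)]
    rw [PySem.List.pyRange_one_append 0 3 count (by omega) (by omega), List.map_append]
    have hfront : (PySem.List.pyRange 0 3 1).map e = [x0, x1, x2] := by
      simp [PySem.List.pyRange_one, List.range_succ, h0, h1, h2]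
    have hback : (PySem.List.pyRange 3 count 1).map e =
        (PySem.List.pyRange 3 count 1).map (fun i =>
          ("AI Tool Example " ++ PySem.Int.toStr (i + 1),
           "Implementation of " ++ pattern_name ++ " in modern AI application")) := by
      apply List.map_congr_left
      intro i hi
      exact hp i ((PySem.List.mem_pyRange_one.mp hi).1
)
    rw [hfront, hback]

-- ===== VERDICT (by name: the statements are the Claim_ definitions above) =====
theorem generate_manifestations_for_pattern_py_spec : Claim_unchanged_generate_manifestations_for_pattern_py := by
  intro pattern_name count _
  unfold Spec_generate_manifestations_for_pattern_py D_generate_manifestations_for_pattern_py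
  intro hD
  simp only [generate_manifestations_for_pattern_py, generate_manifestations_for_pattern_py_alt]
  simp only [pvIdx_formula (fun kw => PySem.Str.isIn kw (PySem.Str.lower pattern_name))]
  by_cases hc : 0 ≤ count
  · split_ifs with hcase1 hcase2 hcase3 hcase4 hcase5 hcase6 <;>
      · rw [pvPadA_eq]
        exact pvKey pattern_name count hc _ _ _ _
          (by first | decide | (simp [pvEntry, PySem.List.pyGetD, PySem.List.pyGet?, PySem.List.pyIdx?, String.append_assoc]; try rfl))
          (by first | decide | (simp [pvEntry, PySem.List.pyGetD, PySem.List.pyGet?, PySem.List.pyIdx?, String.append_assoc]; try rfl))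
          (by first | decide | (simp [pvEntry, PySem.List.pyGetD, PySem.List.pyGet?, PySem.List.pyIdx?, String.append_assoc]; try rfl))
          (fun i hi => by simp [pvEntry, hi])
  · -- count ≤ -3 here (counts -1, -2 are inside D_)
    have hcount : count ≤ -3 := by omega
    rw [pvPadA_eq, PySem.List.pyRange_one_eq_nil (by simp; omega), List.map_nil, List.append_nil,
        PySem.List.pyRange_one_eq_nil (by omega), List.map_nil]
    split_ifs <;>
      · rw [show count = -(((-count).toNat : Nat) : Int) by omega,
          PySem.List.slice_to_neg_natCast _ _ (by omega)]
        simp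
        omega

theorem generate_manifestations_for_pattern_py_changed : Claim_changed_generate_manifestations_for_pattern_py := by
  unfold Claim_changed_generate_manifestations_for_pattern_py
  refine ⟨by decide, by decide, ?_, by decide, by decide⟩
  simp only [pvDiffWitness_generate_manifestations_for_pattern_py,
    pvDiffWitnessOut_generate_manifestations_for_pattern_py,
    generate_manifestations_for_pattern_py]
  rw [pvPadA_eq]
  decide

theorem generate_manifestations_for_pattern_py_tight : Claim_exact_generate_manifestations_for_pattern_py := by
  intro pattern_name count _ hD
  obtain ⟨h1, h2⟩ := hD
  simp only [generate_manifestations_for_pattern_py, generate_manifestations_for_pattern_py_alt]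
  rw [pvPadA_eq, PySem.List.pyRange_one_eq_nil (by simp; omega), List.map_nil, List.append_nil,
      PySem.List.pyRange_one_eq_nil (by omega), List.map_nil]
  intro hcontra
  have hlen := congrArg List.length hcontra
  rw [show count = -(((-count).toNat : Nat) : Int) by omega,
      PySem.List.slice_to_neg_natCast _ _ (by omega)] at hlen
  split_ifs at hlen <;> simp at hlen <;> omega
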